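-- pv_equiv track=rewrite | github.com/hosod/swim-record-db | swimrecord/views.py | rank
-- ===== SOURCE A (Python) =====
-- def rank(points_tps):
--     # point_tps: list[tuple{name(swimmer or team), points}]
--     points = points_tps[0][1]
--     current_rank = 1
--     same = 1
--     pre_pt = points
--     result = [current_rank]
--
--     for index in range(1, len(points_tps)):
--         points = points_tps[index][1]
--         if points < pre_pt:
--             # 同率じゃないとき
--             current_rank += same
--             same = 1
--             pre_pt = points
--         else:
--             # 同率のとき
--             same += 1
--         result.append(current_rank)
--     return result
-- ===== SOURCE B (Python) =====
-- def rank(points_tps):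
--     # point_tps: list[tuple{name(swimmer or team), points}]
--     pts = [pt for _, pt in points_tps]
--     # pass 1: boundary positions -- each index where a strict new minimum starts a rank group
--     boundaries = []
--     m = None
--     for i, pt in enumerate(pts):
--         if m is None or pt < m:
--             boundaries.append(i)
--             m = pt
--     # pass 2: fill each group [b, e) with rank b + 1
--     result = []
--     for b, e in zip(boundaries, boundaries[1:] + [len(pts)]):
--         result += [b + 1] * (e - b)
--     return result
-- ===== Notes on version B (the rewrite author's own statement) =====
-- stated objective: alternative
-- what changed: B replaces A's single accumulator pass (current_rank/same/pre_pt) by two staged passes over an explicit intermediate structure: first collect the list of group-start indices (positions of strict new minima), then fill each group [b, e) with rank b+1 via replication.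
import Mathlib
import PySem

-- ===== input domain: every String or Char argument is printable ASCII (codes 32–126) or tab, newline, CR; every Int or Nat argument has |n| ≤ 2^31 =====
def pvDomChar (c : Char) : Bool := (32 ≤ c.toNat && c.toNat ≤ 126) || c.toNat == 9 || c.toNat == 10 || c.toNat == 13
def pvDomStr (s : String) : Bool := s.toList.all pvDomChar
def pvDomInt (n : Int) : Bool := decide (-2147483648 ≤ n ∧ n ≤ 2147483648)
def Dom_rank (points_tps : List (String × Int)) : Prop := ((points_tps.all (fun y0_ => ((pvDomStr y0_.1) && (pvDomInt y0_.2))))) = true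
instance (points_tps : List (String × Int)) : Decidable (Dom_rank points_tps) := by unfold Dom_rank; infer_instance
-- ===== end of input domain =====

-- B replaces A's single accumulator pass by two staged passes: collect the list of
-- group-start indices (strict new minima), then fill each group with rank b+1 (objective: alternative).

-- ===== PORT A =====
-- loop 'for index in range(1, len(points_tps))' with state (current_rank, same, pre_pt, result)
def rankLoopA : List (String × Int) → Int → Int → Int → List Int → List Int
  | [], _, _, _, res => res
  | (_, pt) :: rest, cr, same, pre, res =>
    if pt < pre then rankLoopA rest (cr + same) 1 pt (res ++ [cr + same])
    else rankLoopA rest cr (same + 1) pre (res ++ [cr])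

def rank (points_tps : List (String × Int)) : List Int :=
  match points_tps with
  | [] => []  -- unreachable under Pre_rank: Python raises IndexError on []
  | (_, p0) :: rest => rankLoopA rest 1 1 p0 [1]

-- ===== PORT B =====
-- pass 1: 'for i, pt in enumerate(pts): if m is None or pt < m: boundaries.append(i); m = pt'
def bndLoop : List Int → Nat → Option Int → List Nat
  | [], _, _ => []
  | pt :: rest, i, none => i :: bndLoop rest (i + 1) (some pt)
  | pt :: rest, i, some m =>
    if pt < m then i :: bndLoop rest (i + 1) (some pt)
    else bndLoop rest (i + 1) (some m)

-- pass 2: 'for b, e in zip(boundaries, boundaries[1:] + [len(pts)]): result += [b+1]*(e-b)'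
def rank_alt (points_tps : List (String × Int)) : List Int :=
  let pts := points_tps.map (·.2)
  let boundaries := bndLoop pts 0 none
  (boundaries.zip (boundaries.drop 1 ++ [pts.length])).foldl
    (fun res be => res ++ List.replicate (be.2 - be.1) ((be.1 : Int) + 1)) []

-- ===== PRECONDITION & SPEC =====
-- A indexes points_tps[0] and raises IndexError on the empty list, so Pre_ excludes it.
def Pre_rank (points_tps : List (String × Int)) : Prop := points_tps ≠ []
instance (points_tps : List (String × Int)) : Decidable (Pre_rank points_tps) := by unfold Pre_rank; infer_instance
def pvWitness_rank : (List (String × Int)) := [("ann", 7), ("bob", 7), ("cy", 3)]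

def Spec_rank (points_tps : List (String × Int)) (out : List Int) : Prop := out = rank_alt points_tps
instance (points_tps : List (String × Int)) (out : List Int) : Decidable (Spec_rank points_tps out) := by unfold Spec_rank; infer_instance

-- ===== CLAIM =====
def Claim_equal_rank : Prop := ∀ (points_tps : List (String × Int)), Dom_rank points_tps → Pre_rank points_tps → Spec_rank points_tps (rank points_tps)

-- ===== LEMMAS AND PROOFS =====

-- The common intermediate: ranks emitted from position i on, last group start gs, current min pre.
def pvG : List Int → Nat → Nat → Int → List Int
  | [], _, _, _ => []
  | pt :: rest, i, gs, pre =>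
    if pt < pre then ((i : Int) + 1) :: pvG rest (i + 1) i pt
    else ((gs : Int) + 1) :: pvG rest (i + 1) gs pre

-- The zip/flatMap form of B's fill pass.
def pvZF (n : Nat) (bs : List Nat) : List Int :=
  (bs.zip (bs.drop 1 ++ [n])).flatMap (fun be => List.replicate (be.2 - be.1) ((be.1 : Int) + 1))

theorem pvZF_single (n b : Nat) : pvZF n [b] = List.replicate (n - b) ((b : Int) + 1) := by
  simp [pvZF]

theorem pvZF_cons (n b c : Nat) (bs : List Nat) :
    pvZF n (b :: c :: bs) = List.replicate (c - b) ((b : Int) + 1) ++ pvZF n (c :: bs) := by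
  simp [pvZF]

-- A's loop emits pvG: current_rank = gs+1, running index = gs + same.
theorem rankLoopA_eq_pvG (l : List (String × Int)) : ∀ (gs k : Nat) (pre : Int) (res : List Int),
    rankLoopA l ((gs : Int) + 1) ((k : Int) + 1) pre res
      = res ++ pvG (l.map (·.2)) (gs + k + 1) gs pre := by
  induction l with
  | nil => intro gs k pre res; simp [rankLoopA, pvG]
  | cons hd tl ih =>
    intro gs k pre res
    obtain ⟨_, pt⟩ := hd
    by_cases h : pt < pre
    · simp only [rankLoopA, List.map, pvG, if_pos h]
      have e : ((gs : Int) + 1) + ((k : Int) + 1) = ((gs + k + 1 : Nat) : Int) + 1 := by push_cast; ring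
      rw [e]
      have := ih (gs + k + 1) 0 pt (res ++ [((gs + k + 1 : Nat) : Int) + 1])
      simp only [Nat.cast_zero] at this
      rw [show ((0 : Int) + 1) = (1 : Int) by ring] at this
      rw [this]
      simp
    · simp only [rankLoopA, List.map, pvG, if_neg h]
      have e : ((k : Int) + 1) + 1 = ((k + 1 : Nat) : Int) + 1 := by push_cast; ring
      rw [e]
      have := ih gs (k + 1) pre (res ++ [((gs : Int) + 1)])
      rw [this]
      have e2 : gs + (k + 1) + 1 = gs + k + 1 + 1 := by omega
      rw [e2]
      simp

-- B's fill of the boundary list emits pvG too.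
theorem pvZF_bnd (l : List Int) : ∀ (i gs : Nat) (pre : Int), gs ≤ i →
    pvZF (i + l.length) (gs :: bndLoop l i (some pre))
      = List.replicate (i - gs) ((gs : Int) + 1) ++ pvG l i gs pre := by
  induction l with
  | nil =>
    intro i gs pre _
    simp [bndLoop, pvZF_single, pvG]
  | cons pt rest ih =>
    intro i gs pre hle
    by_cases h : pt < pre
    · simp only [bndLoop, if_pos h, pvG]
      rw [pvZF_cons]
      have := ih (i + 1) i pt (Nat.le_succ i)
      rw [show i + (pt :: rest).length = (i + 1) + rest.length by simp; omega, this]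
      rw [show i + 1 - i = 1 by omega]
      simp
    · simp only [bndLoop, if_neg h, pvG]
      have := ih (i + 1) gs pre (le_trans hle (Nat.le_succ i))
      rw [show i + (pt :: rest).length = (i + 1) + rest.length by simp; omega, this]
      rw [show i + 1 - gs = (i - gs) + 1 by omega, List.replicate_succ']
      simp

-- ===== VERDICT =====
theorem rank_spec : Claim_equal_rank := by
  intro pts _ hpre
  unfold Spec_rank
  match pts with
  | [] => exact absurd rfl hpre
  | (nm, p0) :: rest =>
    show rank ((nm, p0) :: rest) = rank_alt ((nm, p0) :: rest)
    have hA := rankLoopA_eq_pvG rest 0 0 p0 [1]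
    have hB := pvZF_bnd (rest.map (·.2)) 1 0 p0 (by omega)
    simp only [Nat.cast_zero, zero_add] at hA
    simp only [Nat.cast_zero, Nat.sub_zero, zero_add, List.replicate_one] at hB
    simp only [rank, rank_alt, List.map, bndLoop, zero_add,
      PySem.List.foldl_append_eq_flatMap, List.nil_append]
    rw [hA]
    rw [show (p0 :: List.map (fun x => x.2) rest).length
          = 1 + (List.map (fun x : String × Int => x.2) rest).length from by
        simp [Nat.add_comm]]
    exact hB.symm
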